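-- pv_equiv track=rewrite | github.com/LGMchili/DecapAllocation | floorplanning.py | getPossibleMove
-- ===== SOURCE A (Python) =====
-- def getPossibleMove(E):
--     pm_op1, pm_op3 = [], []
--     for i in range(len(E) - 1):
--         if(E[i].isdigit() and E[i+1].isdigit()):
--             pm_op1.append(i)
--         if(E[i].isdigit() and not E[i+1].isdigit() and 2*getBallot(E, i+1) < i and E[i+1] != E[i-1]):
--             pm_op3.append(i)
--         elif(not E[i].isdigit() and E[i+1].isdigit()):
--             if(i == len(E) - 2 or E[i] != E[i+2]):
--                 pm_op3.append(i)
--     return pm_op1, pm_op3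
--
-- def getBallot(E, i):
--     count = 0
--     for j in range(i+1):
--         if(not E[j].isdigit()):
--             count += 1
--     return count
-- ===== SOURCE B (Python) =====
-- def getPossibleMove(E):
--     # One pass: maintain nd = number of non-digit chars in E[:i], making the
--     # ballot count available without A's per-position rescan.
--     pm_op1, pm_op3 = [], []
--     n = len(E)
--     nd = 0
--     for i in range(n - 1):
--         a = E[i].isdigit()
--         b = E[i + 1].isdigit()
--         if a and b:
--             pm_op1.append(i)
--         elif a:
--             # getBallot(E, i+1) == nd + 1 here (E[i] digit, E[i+1] non-digit)
--             if 2 * (nd + 1) < i and E[i + 1] != E[i - 1]: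
--                 pm_op3.append(i)
--         elif b:
--             if i == n - 2 or E[i] != E[i + 2]:
--                 pm_op3.append(i)
--         nd += 0 if a else 1
--     return pm_op1, pm_op3
-- ===== Notes on version B (the rewrite author's own statement) =====
-- stated objective: alternative
-- what changed: B replaces A's per-position getBallot rescan (an O(n) inner loop counting non-digits from the start) with a single running non-digit counter maintained across one pass.
import Mathlib
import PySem

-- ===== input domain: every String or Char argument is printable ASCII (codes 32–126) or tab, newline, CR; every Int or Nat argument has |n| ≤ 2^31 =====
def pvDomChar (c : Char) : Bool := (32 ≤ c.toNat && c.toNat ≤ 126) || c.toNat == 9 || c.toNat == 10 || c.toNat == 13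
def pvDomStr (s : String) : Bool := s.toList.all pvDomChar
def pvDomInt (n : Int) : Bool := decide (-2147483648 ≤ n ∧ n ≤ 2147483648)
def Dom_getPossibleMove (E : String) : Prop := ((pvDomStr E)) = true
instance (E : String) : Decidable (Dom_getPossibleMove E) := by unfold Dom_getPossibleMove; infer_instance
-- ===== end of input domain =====

-- B replaces A's per-position getBallot rescan by one running non-digit counter carried through a single pass (a different loop structure; a timing run did not confirm a >=1.5x speed-up on the generated inputs).
-- ===== PORT A =====
-- at every call site of pyGetD below the index is in Python range (possibly -1, which pyGetD reads from the end), so the default ' ' is never used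
def getBallot (E : String) (i : Int) : Int :=
  (PySem.List.pyRange 0 (i + 1) 1).foldl
    (fun count j =>
      if ¬ (PySem.Chars.isdigit (PySem.List.pyGetD E.toList j ' ') = true) then count + 1
      else count) 0

def getPossibleMove (E : String) : List Int × List Int :=
  let L := E.toList
  let n : Int := (L.length : Int)
  (PySem.List.pyRange 0 (n - 1) 1).foldl
    (fun (acc : List Int × List Int) i =>
      let ci := PySem.List.pyGetD L i ' '
      let ci1 := PySem.List.pyGetD L (i + 1) ' '
      let acc1 :=
        if PySem.Chars.isdigit ci = true ∧ PySem.Chars.isdigit ci1 = true then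
          (acc.1 ++ [i], acc.2)
        else acc
      if PySem.Chars.isdigit ci = true ∧ ¬ PySem.Chars.isdigit ci1 = true ∧
          2 * getBallot E (i + 1) < i ∧ ci1 ≠ PySem.List.pyGetD L (i - 1) ' ' then
        (acc1.1, acc1.2 ++ [i])
      else if ¬ PySem.Chars.isdigit ci = true ∧ PySem.Chars.isdigit ci1 = true then
        if i = n - 2 ∨ ci ≠ PySem.List.pyGetD L (i + 2) ' ' then
          (acc1.1, acc1.2 ++ [i])
        else acc1
      else acc1)
    ([], [])

-- ===== PORT B =====
-- B: one pass, state (pm_op1, pm_op3, nd) with nd = running count of non-digit chars in E[:i]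
def getPossibleMove_alt (E : String) : List Int × List Int :=
  let L := E.toList
  let n : Int := (L.length : Int)
  let r :=
    (PySem.List.pyRange 0 (n - 1) 1).foldl
      (fun (s : List Int × List Int × Int) i =>
        let a := PySem.Chars.isdigit (PySem.List.pyGetD L i ' ')
        let b := PySem.Chars.isdigit (PySem.List.pyGetD L (i + 1) ' ')
        let s' :=
          if a && b then (s.1 ++ [i], s.2.1, s.2.2)
          else if a then
            if 2 * (s.2.2 + 1) < i ∧
                PySem.List.pyGetD L (i + 1) ' ' ≠ PySem.List.pyGetD L (i - 1) ' ' then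
              (s.1, s.2.1 ++ [i], s.2.2)
            else s
          else if b then
            if i = n - 2 ∨ PySem.List.pyGetD L i ' ' ≠ PySem.List.pyGetD L (i + 2) ' ' then
              (s.1, s.2.1 ++ [i], s.2.2)
            else s
          else s
        (s'.1, s'.2.1, if a then s'.2.2 else s'.2.2 + 1))
      ([], [], 0)
  (r.1, r.2.1)


-- ===== PRECONDITION & SPEC =====
def Spec_getPossibleMove (E : String) (out : List Int × List Int) : Prop := out = getPossibleMove_alt E
instance (E : String) (out : List Int × List Int) : Decidable (Spec_getPossibleMove E out) := by unfold Spec_getPossibleMove; infer_instance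

-- ===== CLAIM (what is proved, stated in full; the proofs are below) =====
def Claim_equal_getPossibleMove : Prop := ∀ (E : String), Dom_getPossibleMove E → Spec_getPossibleMove E (getPossibleMove E)

-- ===== LEMMAS AND PROOFS =====
-- proof-side copies of the two loop bodies
def pvStepA (E : String) (acc : List Int × List Int) (i : Int) : List Int × List Int :=
  let L := E.toList
  let n : Int := (L.length : Int)
  let ci := PySem.List.pyGetD L i ' '
  let ci1 := PySem.List.pyGetD L (i + 1) ' '
  let acc1 :=
    if PySem.Chars.isdigit ci = true ∧ PySem.Chars.isdigit ci1 = true then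
      (acc.1 ++ [i], acc.2)
    else acc
  if PySem.Chars.isdigit ci = true ∧ ¬ PySem.Chars.isdigit ci1 = true ∧
      2 * getBallot E (i + 1) < i ∧ ci1 ≠ PySem.List.pyGetD L (i - 1) ' ' then
    (acc1.1, acc1.2 ++ [i])
  else if ¬ PySem.Chars.isdigit ci = true ∧ PySem.Chars.isdigit ci1 = true then
    if i = n - 2 ∨ ci ≠ PySem.List.pyGetD L (i + 2) ' ' then
      (acc1.1, acc1.2 ++ [i])
    else acc1
  else acc1

def pvStepB (E : String) (s : List Int × List Int × Int) (i : Int) : List Int × List Int × Int :=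
  let L := E.toList
  let n : Int := (L.length : Int)
  let a := PySem.Chars.isdigit (PySem.List.pyGetD L i ' ')
  let b := PySem.Chars.isdigit (PySem.List.pyGetD L (i + 1) ' ')
  let s' :=
    if a && b then (s.1 ++ [i], s.2.1, s.2.2)
    else if a then
      if 2 * (s.2.2 + 1) < i ∧
          PySem.List.pyGetD L (i + 1) ' ' ≠ PySem.List.pyGetD L (i - 1) ' ' then
        (s.1, s.2.1 ++ [i], s.2.2)
      else s
    else if b then
      if i = n - 2 ∨ PySem.List.pyGetD L i ' ' ≠ PySem.List.pyGetD L (i + 2) ' ' then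
        (s.1, s.2.1 ++ [i], s.2.2)
      else s
    else s
  (s'.1, s'.2.1, if a then s'.2.2 else s'.2.2 + 1)

def pvNdc (L : List Char) (k : Nat) : Int :=
  ((L.take k).countP (fun c => !(PySem.Chars.isdigit c)) : Int)

lemma pvA_eq (E : String) :
    getPossibleMove E
      = (PySem.List.pyRange 0 ((E.toList.length : Int) - 1) 1).foldl (pvStepA E) ([], []) := rfl

lemma pvB_eq (E : String) :
    getPossibleMove_alt E
      = (((PySem.List.pyRange 0 ((E.toList.length : Int) - 1) 1).foldl (pvStepB E) ([], [], 0)).1,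
         ((PySem.List.pyRange 0 ((E.toList.length : Int) - 1) 1).foldl (pvStepB E) ([], [], 0)).2.1) := rfl

lemma pvNdc_succ (L : List Char) (k : Nat) (hk : k < L.length) :
    pvNdc L (k + 1) = pvNdc L k + (if PySem.Chars.isdigit L[k] = true then 0 else 1) := by
  have h : L.take (k + 1) = L.take k ++ [L[k]] := by
    rw [List.take_add_one]
    simp [List.getElem?_eq_getElem hk]
  rw [pvNdc, pvNdc, h, List.countP_append]
  by_cases hd : PySem.Chars.isdigit L[k] = true <;> simp [hd]

lemma getBallot_eq_pvNdc (E : String) (k : Nat) (hk : k < E.toList.length) :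
    getBallot E (k : Int) = pvNdc E.toList (k + 1) := by
  have h1 : getBallot E (k : Int)
      = (PySem.List.pyRange 0 ((k:Int) + 1) 1).foldl
          (fun count j =>
            if ¬ (PySem.Chars.isdigit (PySem.List.pyGetD (E.toList.take (k+1)) j ' ') = true)
            then count + 1 else count) 0 := by
    rw [getBallot]
    apply PySem.List.foldl_congr_mem
    intro acc j hj
    rw [PySem.List.mem_pyRange_one] at hj
    have hjn : j.toNat < k + 1 := by omega
    rw [PySem.List.pyGetD_of_nonneg _ _ hj.1, PySem.List.pyGetD_of_nonneg _ _ hj.1]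
    congr 1
    rw [List.getD_eq_getElem?_getD, List.getD_eq_getElem?_getD, List.getElem?_take]
    simp [hjn]
  have hlen : ((E.toList.take (k+1)).length : Int) = (k:Int) + 1 := by
    rw [List.length_take]; omega
  rw [h1, ← hlen, PySem.List.foldl_pyRange_zero_pyGetD' (E.toList.take (k+1)) ' '
    (fun count c => if ¬ (PySem.Chars.isdigit c = true) then count + 1 else count) 0,
    PySem.List.foldl_ite_add_one]
  simp [pvNdc]

lemma pvStep_eq (E : String) (i : Nat) (hi : i + 1 < E.toList.length) (p1 p3 : List Int) :
    pvStepB E (p1, p3, pvNdc E.toList i) (i : Int)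
      = ((pvStepA E (p1, p3) (i : Int)).1, (pvStepA E (p1, p3) (i : Int)).2,
         pvNdc E.toList (i + 1)) := by
  have hi0 : i < E.toList.length := by omega
  have hci : PySem.List.pyGetD E.toList (i : Int) ' ' = E.toList[i] := by
    rw [PySem.List.pyGetD_eq_getElem _ _ (by omega) (by exact_mod_cast hi0)]
    congr 1
  have hci1 : PySem.List.pyGetD E.toList ((i : Int) + 1) ' ' = E.toList[i+1] := by
    rw [show ((i:Int)+1) = ((i+1 : Nat) : Int) by push_cast; ring]
    rw [PySem.List.pyGetD_eq_getElem _ _ (by omega) (by exact_mod_cast hi)]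
    congr 1
  have hball : getBallot E ((i : Int) + 1) = pvNdc E.toList (i + 2) := by
    rw [show ((i:Int)+1) = ((i+1 : Nat) : Int) by push_cast; ring]
    exact getBallot_eq_pvNdc E (i+1) hi
  rw [pvStepA, pvStepB]
  simp only [hci, hci1, hball]
  have hnd := pvNdc_succ E.toList i hi0
  have h2 : pvNdc E.toList (i+2) = pvNdc E.toList i +
      (if PySem.Chars.isdigit E.toList[i] = true then 0 else 1) +
      (if PySem.Chars.isdigit E.toList[i+1] = true then 0 else 1) := by
    rw [show i+2 = (i+1)+1 by ring, pvNdc_succ E.toList (i+1) hi, pvNdc_succ E.toList i hi0]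
  by_cases ha : PySem.Chars.isdigit E.toList[i] = true <;>
    by_cases hb : PySem.Chars.isdigit E.toList[i+1] = true
  · simp [ha, hb, hnd]
  · rw [show ((2:Int) * (pvNdc E.toList i + 1)) = 2 * pvNdc E.toList (i+2) by rw [h2]; simp [ha, hb]]
    simp only [ha, hb, decide_true, decide_false, Bool.and_false, Bool.false_and,
      if_true, if_false, Bool.false_eq_true, not_true, not_false_iff, true_and, false_and,
      and_false, and_true, ite_false, ite_true]
    split_ifs <;> simp [hnd, ha]
  · simp only [ha, hb, decide_true, decide_false, Bool.and_false, Bool.false_and,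
      if_true, if_false, Bool.false_eq_true, not_true, not_false_iff, true_and, false_and,
      and_false, and_true, ite_false, ite_true]
    split_ifs <;> simp [hnd, ha]
  · simp [ha, hb, hnd]

lemma pvLoop (E : String) : ∀ (m i : Nat) (p1 p3 : List Int),
    i + m = E.toList.length - 1 →
    (PySem.List.pyRange (i : Int) ((E.toList.length : Int) - 1) 1).foldl (pvStepA E) (p1, p3)
      = (((PySem.List.pyRange (i : Int) ((E.toList.length : Int) - 1) 1).foldl (pvStepB E)
            (p1, p3, pvNdc E.toList i)).1,
         ((PySem.List.pyRange (i : Int) ((E.toList.length : Int) - 1) 1).foldl (pvStepB E)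
            (p1, p3, pvNdc E.toList i)).2.1) := by
  intro m
  induction m with
  | zero =>
      intro i p1 p3 h
      have hle : (E.toList.length : Int) - 1 ≤ (i : Int) := by omega
      rw [PySem.List.pyRange_one_eq_nil hle]
      simp
  | succ m ih =>
      intro i p1 p3 h
      have hlt : (i : Int) < (E.toList.length : Int) - 1 := by omega
      rw [PySem.List.pyRange_one_cons hlt]
      simp only [List.foldl_cons]
      rw [pvStep_eq E i (by omega) p1 p3]
      have hih := ih (i + 1) (pvStepA E (p1, p3) (i : Int)).1 (pvStepA E (p1, p3) (i : Int)).2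
        (by omega)
      push_cast at hih
      rw [← hih]

-- ===== VERDICT (by name: the statement is the Claim_ definition above) =====
theorem getPossibleMove_spec : Claim_equal_getPossibleMove := by
  intro E _
  unfold Spec_getPossibleMove
  rw [pvA_eq, pvB_eq]
  have h := pvLoop E (E.toList.length - 1) 0 [] [] (by omega)
  push_cast at h
  simpa [pvNdc] using h
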